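-- pv_equiv track=rewrite | github.com/Katlii/Python-project | 11_Největší jeskyně.py | jeskyni
-- ===== SOURCE A (Python) =====
-- from typing import List
--
-- def jeskyni(matrix: List[List[int]]) -> List[int]:
--     def check(x: int, y: int, count: int) -> int:
--         combinations.add((x, y))
--         teziste1.append(x)
--         teziste2.append(y)
--         count += 1
--         if x - 1 >= 0 and matrix[x - 1][y] == 0 and (x - 1, y) not in combinations:
--
--             return check(x - 1, y, count)
--         if x + 1 < len(matrix) and matrix[x + 1][y] == 0 and (x + 1, y) not in combinations:
--
--             return check(x + 1, y, count)
--         if y - 1 >= 0 and matrix[x][y - 1] == 0 and (x, y - 1) not in combinations: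
--
--             return check(x, y - 1, count)
--         if y + 1 < len(matrix[0]) and matrix[x][y + 1] == 0 and (x, y + 1) not in combinations:
--
--             return check(x, y + 1, count)
--         return count
--
--
--     combinations = set()
--     teziste1=[]
--     teziste2=[]
--     counts = []
--     for line_index, line in enumerate(matrix):
--         for el_index, element in enumerate(line):
--             #if line_index==0:
--                 if element == 0 and (line_index, el_index) not in combinations:
--                     total_count = check(line_index, el_index, 0)
--                     counts.append(total_count)
--     for i in range(len(counts)-1):
--         counts.remove(min(counts))
--
--     counts.append(0)
--     counts.append(0)
--     for i in range(counts[0]):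
--         counts[1]=counts[1]+teziste1[i]
--     for j in range(counts[0]):
--         counts[2]=counts[2]+teziste2[j]
--     if counts[0]!=0:
--         counts[1]=counts[1]//counts[0]
--         counts[2]=counts[2]//counts[0]
--
--     return counts
-- ===== SOURCE B (Python) =====
-- from typing import List
--
-- def jeskyni(matrix: List[List[int]]) -> List[int]:
--     rows = len(matrix)
--     cols = len(matrix[0]) if matrix else 0
--     visited = set()
--     xs = []
--     ys = []
--     counts = []
--     for i, line in enumerate(matrix):
--         for j, element in enumerate(line):
--             if element == 0 and (i, j) not in visited:
--                 # iterative single-path walk: step to the first valid unvisited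
--                 # zero neighbour (up, down, left, right) until none qualifies
--                 x, y, count = i, j, 0
--                 while True:
--                     visited.add((x, y))
--                     xs.append(x)
--                     ys.append(y)
--                     count += 1
--                     if x - 1 >= 0 and matrix[x - 1][y] == 0 and (x - 1, y) not in visited:
--                         nxt = (x - 1, y)
--                     elif x + 1 < rows and matrix[x + 1][y] == 0 and (x + 1, y) not in visited:
--                         nxt = (x + 1, y)
--                     elif y - 1 >= 0 and matrix[x][y - 1] == 0 and (x, y - 1) not in visited:
--                         nxt = (x, y - 1)
--                     elif y + 1 < cols and matrix[x][y + 1] == 0 and (x, y + 1) not in visited: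
--                         nxt = (x, y + 1)
--                     else:
--                         break
--                     x, y = nxt
--                 counts.append(count)
--     if not counts:
--         return [0, 0]
--     k = max(counts)
--     return [k, sum(xs[:k]) // k, sum(ys[:k]) // k]
-- ===== Notes on version B (the rewrite author's own statement) =====
-- stated objective: simpler
-- what changed: B replaces A's recursive single-path walk by an iterative while-loop that computes the next cell into a variable, and replaces A's repeated counts.remove(min(counts)) loop and the two index-accumulation loops into counts[1]/counts[2] by max(counts) and sliced sums with floor division.
-- outside the precondition, e.g. on jeskyni([[0, 0, 1], [0, 0]]): A returns [4, 0, 0], B returns [4, 0, 0]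
import Mathlib
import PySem

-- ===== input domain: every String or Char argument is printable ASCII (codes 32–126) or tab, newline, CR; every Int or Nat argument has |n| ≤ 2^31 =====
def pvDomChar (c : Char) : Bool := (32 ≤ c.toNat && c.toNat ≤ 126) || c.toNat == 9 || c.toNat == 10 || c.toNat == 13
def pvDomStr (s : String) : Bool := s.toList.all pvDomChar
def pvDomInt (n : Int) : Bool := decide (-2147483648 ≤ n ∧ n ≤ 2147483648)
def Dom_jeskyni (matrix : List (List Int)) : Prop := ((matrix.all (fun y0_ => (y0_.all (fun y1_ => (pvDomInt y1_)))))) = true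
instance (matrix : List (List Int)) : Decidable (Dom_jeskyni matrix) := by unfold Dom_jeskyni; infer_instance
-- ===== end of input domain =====

-- B re-implements A's recursive single-path walk as an iterative walk over a neighbour-offset
-- list and replaces the repeated remove(min)-loop and index-accumulation loops by max() and
-- sliced sums (objective: simpler; same asymptotic cost).

-- shared totality guard: an upper bound on walk length (each step visits a fresh grid cell);
-- Python needs no fuel, and on the admitted inputs the bound is never reached
def jeskyniFuel (matrix : List (List Int)) : Nat :=
  matrix.foldl (fun a r => a + r.length) 0 + 1

-- ===== PORT A =====
-- matrix[i][j]; total via default, only evaluated in range on rectangular inputs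
def jesCell (matrix : List (List Int)) (i j : Int) : Int :=
  PySem.List.pyGetD (PySem.List.pyGetD matrix i []) j 0

-- the recursive `check`: add cell to the globals, then recurse into the first valid
-- unvisited zero neighbour, in A's order (x-1, x+1, y-1, y+1)
def jesA_check (matrix : List (List Int)) :
    Nat → PySem.Set (Int × Int) → List Int → List Int → Int → Int → Int →
    Int × PySem.Set (Int × Int) × List Int × List Int
  | 0, comb, t1, t2, _, _, count => (count, comb, t1, t2)
  | fuel + 1, comb, t1, t2, x, y, count =>
    let comb := PySem.Set.add comb (x, y)
    let t1 := t1 ++ [x]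
    let t2 := t2 ++ [y]
    let count := count + 1
    if 0 ≤ x - 1 ∧ jesCell matrix (x - 1) y = 0 ∧ (x - 1, y) ∉ comb then
      jesA_check matrix fuel comb t1 t2 (x - 1) y count
    else if x + 1 < (matrix.length : Int) ∧ jesCell matrix (x + 1) y = 0 ∧ (x + 1, y) ∉ comb then
      jesA_check matrix fuel comb t1 t2 (x + 1) y count
    else if 0 ≤ y - 1 ∧ jesCell matrix x (y - 1) = 0 ∧ (x, y - 1) ∉ comb then
      jesA_check matrix fuel comb t1 t2 x (y - 1) count
    else if y + 1 < ((PySem.List.pyGetD matrix 0 []).length : Int) ∧ jesCell matrix x (y + 1) = 0 ∧ (x, y + 1) ∉ comb then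
      jesA_check matrix fuel comb t1 t2 x (y + 1) count
    else (count, comb, t1, t2)

-- the outer double loop: state (combinations, teziste1, teziste2, counts)
def jesA_outer (matrix : List (List Int)) :
    PySem.Set (Int × Int) × List Int × List Int × List Int :=
  (PySem.List.enumerate matrix 0).foldl (fun st li =>
      (PySem.List.enumerate li.2 0).foldl (fun st el =>
        if el.2 = 0 ∧ (li.1, el.1) ∉ st.1 then
          let r := jesA_check matrix (jeskyniFuel matrix) st.1 st.2.1 st.2.2.1 li.1 el.1 0
          (r.2.1, r.2.2.1, r.2.2.2, st.2.2.2 ++ [r.1])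
        else st) st)
    (PySem.Set.empty, [], [], [])

def jeskyni (matrix : List (List Int)) : List Int :=
  let st := jesA_outer matrix
  let t1 := st.2.1
  let t2 := st.2.2.1
  let counts := st.2.2.2
  -- for i in range(len(counts)-1): counts.remove(min(counts))  (min/remove never fail in Python here)
  let counts := (PySem.List.pyRange 0 ((counts.length : Int) - 1) 1).foldl
      (fun cs _ => match PySem.List.min? cs (fun v => v) with
        | some m => (PySem.List.remove? cs m).getD cs
        | none => cs) counts
  let counts := counts ++ [0]
  let counts := counts ++ [0]
  let counts := (PySem.List.pyRange 0 (PySem.List.pyGetD counts 0 0) 1).foldl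
      (fun cs i => PySem.List.pySetD cs 1 (PySem.List.pyGetD cs 1 0 + PySem.List.pyGetD t1 i 0)) counts
  let counts := (PySem.List.pyRange 0 (PySem.List.pyGetD counts 0 0) 1).foldl
      (fun cs j => PySem.List.pySetD cs 2 (PySem.List.pyGetD cs 2 0 + PySem.List.pyGetD t2 j 0)) counts
  if PySem.List.pyGetD counts 0 0 ≠ 0 then
    let counts := PySem.List.pySetD counts 1
      (PySem.Int.floordiv (PySem.List.pyGetD counts 1 0) (PySem.List.pyGetD counts 0 0))
    let counts := PySem.List.pySetD counts 2
      (PySem.Int.floordiv (PySem.List.pyGetD counts 2 0) (PySem.List.pyGetD counts 0 0))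
    counts
  else counts

-- ===== PORT B =====
-- cols = len(matrix[0]) if matrix else 0
def jesCols (matrix : List (List Int)) : Int :=
  match matrix with | [] => 0 | r :: _ => (r.length : Int)

-- nxt: the first valid unvisited zero neighbour (up, down, left, right), or None
def jesB_next (matrix : List (List Int)) (rows cols : Int)
    (comb : PySem.Set (Int × Int)) (x y : Int) : Option (Int × Int) :=
  if 0 ≤ x - 1 ∧ jesCell matrix (x - 1) y = 0 ∧ (x - 1, y) ∉ comb then some (x - 1, y)
  else if x + 1 < rows ∧ jesCell matrix (x + 1) y = 0 ∧ (x + 1, y) ∉ comb then some (x + 1, y)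
  else if 0 ≤ y - 1 ∧ jesCell matrix x (y - 1) = 0 ∧ (x, y - 1) ∉ comb then some (x, y - 1)
  else if y + 1 < cols ∧ jesCell matrix x (y + 1) = 0 ∧ (x, y + 1) ∉ comb then some (x, y + 1)
  else none

-- the `while True` walk loop: record the cell, then either step to nxt or break
def jesB_walk (matrix : List (List Int)) (rows cols : Int) :
    Nat → PySem.Set (Int × Int) → List Int → List Int → Int → Int → Int →
    Int × PySem.Set (Int × Int) × List Int × List Int
  | 0, comb, xs, ys, _, _, count => (count, comb, xs, ys)
  | fuel + 1, comb, xs, ys, x, y, count =>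
    let comb := PySem.Set.add comb (x, y)
    let xs := xs ++ [x]
    let ys := ys ++ [y]
    let count := count + 1
    match jesB_next matrix rows cols comb x y with
    | some (nx, ny) => jesB_walk matrix rows cols fuel comb xs ys nx ny count
    | none => (count, comb, xs, ys)

-- the same outer double loop, driving the iterative walk
def jesB_outer (matrix : List (List Int)) :
    PySem.Set (Int × Int) × List Int × List Int × List Int :=
  (PySem.List.enumerate matrix 0).foldl (fun st li =>
      (PySem.List.enumerate li.2 0).foldl (fun st el =>
        if el.2 = 0 ∧ (li.1, el.1) ∉ st.1 then
          let r := jesB_walk matrix (matrix.length : Int) (jesCols matrix)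
            (jeskyniFuel matrix) st.1 st.2.1 st.2.2.1 li.1 el.1 0
          (r.2.1, r.2.2.1, r.2.2.2, st.2.2.2 ++ [r.1])
        else st) st)
    (PySem.Set.empty, [], [], [])

def jeskyni_alt (matrix : List (List Int)) : List Int :=
  let st := jesB_outer matrix
  let xs := st.2.1
  let ys := st.2.2.1
  let counts := st.2.2.2
  if counts = [] then [0, 0]
  else
    let k := (PySem.List.max? counts (fun v => v)).getD 0   -- max(counts); counts ≠ [] here
    [k, PySem.Int.floordiv (PySem.List.slice xs none (some k)).sum k,
        PySem.Int.floordiv (PySem.List.slice ys none (some k)).sum k]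

-- ===== PRECONDITION & SPEC =====
-- Pre_ excludes the inputs on which Python A raises IndexError: in a ragged matrix the walk
-- reads matrix[i-1][j] / matrix[i+1][j] / matrix[i][j+1] next to a zero cell (i, j) and raises
-- when that row is too short.  This static bound also excludes a few ragged inputs on which A
-- happens to return (the offending read is skipped because an earlier branch fired); A and B
-- agree there as well.
def Pre_jeskyni (matrix : List (List Int)) : Prop :=
  ∀ i < matrix.length, ∀ j < (matrix.getD i []).length,
    (matrix.getD i []).getD j 1 = 0 →
      (1 ≤ i → j < (matrix.getD (i - 1) []).length) ∧
      (i + 1 < matrix.length → j < (matrix.getD (i + 1) []).length) ∧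
      (j + 1 < (matrix.headD []).length → j + 1 < (matrix.getD i []).length)
instance (matrix : List (List Int)) : Decidable (Pre_jeskyni matrix) := by
  unfold Pre_jeskyni
  exact Nat.decidableBallLT _ _

def pvWitness_jeskyni : List (List Int) := [[0, 1], [1, 0]]

def Spec_jeskyni (matrix : List (List Int)) (out : List Int) : Prop := out = jeskyni_alt matrix
instance (matrix : List (List Int)) (out : List Int) : Decidable (Spec_jeskyni matrix out) := by
  unfold Spec_jeskyni; infer_instance

-- ===== CLAIM (what is proved, stated in full; the proofs are below) =====
def Claim_equal_jeskyni : Prop := ∀ (matrix : List (List Int)), Dom_jeskyni matrix → Pre_jeskyni matrix → Spec_jeskyni matrix (jeskyni matrix)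

-- ===== LEMMAS AND PROOFS =====

-- the two walks agree, step for step
lemma walk_eq (matrix : List (List Int)) :
    ∀ (fuel : Nat) (comb : PySem.Set (Int × Int)) (t1 t2 : List Int) (x y count : Int),
    jesA_check matrix fuel comb t1 t2 x y count
      = jesB_walk matrix (matrix.length : Int) (jesCols matrix) fuel comb t1 t2 x y count := by
  have hcols : jesCols matrix = ((PySem.List.pyGetD matrix 0 ([] : List Int)).length : Int) := by
    cases matrix with
    | nil => rfl
    | cons r t => simp [jesCols, PySem.List.pyGetD_zero]
  intro fuel
  induction fuel with
  | zero => intro comb t1 t2 x y count; rfl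
  | succ n ih =>
    intro comb t1 t2 x y count
    simp only [hcols] at ih
    simp only [jesA_check, jesB_walk, jesB_next, hcols]
    split_ifs with h1 h2 h3 h4
    · exact ih _ _ _ _ _ _
    · exact ih _ _ _ _ _ _
    · exact ih _ _ _ _ _ _
    · exact ih _ _ _ _ _ _
    · rfl

-- A's outer double loop equals B's (same fold; the walks agree)
lemma outer_eq (matrix : List (List Int)) :
    jesA_outer matrix = jesB_outer matrix := by
  unfold jesA_outer jesB_outer
  simp only [walk_eq matrix, jeskyniFuel]

lemma check_count_le (matrix : List (List Int)) :
    ∀ (fuel : Nat) (comb : PySem.Set (Int × Int)) (t1 t2 : List Int) (x y count : Int),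
    count ≤ (jesA_check matrix fuel comb t1 t2 x y count).1 := by
  intro fuel
  induction fuel with
  | zero => intro comb t1 t2 x y count; exact le_refl _
  | succ n ih =>
    intro comb t1 t2 x y count
    simp only [jesA_check]
    split_ifs with h1 h2 h3 h4
    · exact le_trans (by omega) (ih _ _ _ _ _ _)
    · exact le_trans (by omega) (ih _ _ _ _ _ _)
    · exact le_trans (by omega) (ih _ _ _ _ _ _)
    · exact le_trans (by omega) (ih _ _ _ _ _ _)
    · simp

lemma check_count_pos (matrix : List (List Int))
    (m : Nat) (comb : PySem.Set (Int × Int)) (t1 t2 : List Int) (x y : Int) :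
    1 ≤ (jesA_check matrix (m + 1) comb t1 t2 x y 0).1 := by
  simp only [jesA_check]
  split_ifs with h1 h2 h3 h4
  · exact le_trans (by omega) (check_count_le matrix m _ _ _ _ _ _)
  · exact le_trans (by omega) (check_count_le matrix m _ _ _ _ _ _)
  · exact le_trans (by omega) (check_count_le matrix m _ _ _ _ _ _)
  · exact le_trans (by omega) (check_count_le matrix m _ _ _ _ _ _)
  · simp

-- every recorded cave size is ≥ 1
lemma counts_pos (matrix : List (List Int)) :
    ∀ c ∈ (jesA_outer matrix).2.2.2, 1 ≤ c := by
  unfold jesA_outer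
  have hfuel : jeskyniFuel matrix = matrix.foldl (fun a r => a + r.length) 0 + 1 := rfl
  have inner : ∀ (li : Int × List Int) (l2 : List (Int × Int))
      (st : PySem.Set (Int × Int) × List Int × List Int × List Int),
      (∀ c ∈ st.2.2.2, 1 ≤ c) →
      ∀ c ∈ (l2.foldl (fun st el =>
        if el.2 = 0 ∧ (li.1, el.1) ∉ st.1 then
          let r := jesA_check matrix (jeskyniFuel matrix) st.1 st.2.1 st.2.2.1 li.1 el.1 0
          (r.2.1, r.2.2.1, r.2.2.2, st.2.2.2 ++ [r.1])
        else st) st).2.2.2, 1 ≤ c := by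
    intro li l2
    induction l2 with
    | nil => intro st hst; exact hst
    | cons a t iht =>
      intro st hst
      simp only [List.foldl_cons]
      apply iht
      by_cases hc : a.2 = 0 ∧ (li.1, a.1) ∉ st.1
      · rw [if_pos hc]
        intro c hc2
        rcases List.mem_append.mp hc2 with h | h
        · exact hst c h
        · rw [List.mem_singleton.mp h, hfuel]
          exact check_count_pos matrix _ _ _ _ _ _
      · rw [if_neg hc]; exact hst
  have outer : ∀ (l : List (Int × List Int))
      (st : PySem.Set (Int × Int) × List Int × List Int × List Int),
      (∀ c ∈ st.2.2.2, 1 ≤ c) →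
      ∀ c ∈ (l.foldl (fun st li =>
        (PySem.List.enumerate li.2 0).foldl (fun st el =>
          if el.2 = 0 ∧ (li.1, el.1) ∉ st.1 then
            let r := jesA_check matrix (jeskyniFuel matrix) st.1 st.2.1 st.2.2.1 li.1 el.1 0
            (r.2.1, r.2.2.1, r.2.2.2, st.2.2.2 ++ [r.1])
          else st) st) st).2.2.2, 1 ≤ c := by
    intro l
    induction l with
    | nil => intro st hst; exact hst
    | cons a t iht =>
      intro st hst
      simp only [List.foldl_cons]
      exact iht _ (inner a _ _ hst)
  exact outer _ _ (by intro c hc; simp at hc)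

-- the remove(min)-loop leaves exactly the (first) maximum
lemma foldl_const_iterate {α β : Type} (l : List β) (f : α → α) :
    ∀ (s : α), l.foldl (fun c _ => f c) s = f^[l.length] s := by
  induction l with
  | nil => intro s; rfl
  | cons a t ih =>
    intro s
    simp only [List.foldl_cons, List.length_cons, ih, Function.iterate_succ_apply]

-- one removal of the first minimum keeps the maximum (lists of length ≥ 2)
lemma erase_min_max (cs : List Int) (mn M : Int) (hlen : 2 ≤ cs.length)
    (hmn : PySem.List.min? cs (fun v => v) = some mn)
    (hM : PySem.List.max? cs (fun v => v) = some M) :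
    PySem.List.max? (cs.erase mn) (fun v => v) = some M := by
  have hmnmem : mn ∈ cs := PySem.List.min?_mem hmn
  have hne : cs.erase mn ≠ [] := by
    have := List.length_erase_of_mem hmnmem
    intro h
    rw [h] at this
    simp at this
    omega
  obtain ⟨M', hM'⟩ : ∃ M', PySem.List.max? (cs.erase mn) (fun v => v) = some M' := by
    cases h : PySem.List.max? (cs.erase mn) (fun v => v) with
    | none => exact absurd ((PySem.List.max?_eq_none_iff _ _).mp h) hne
    | some m => exact ⟨m, rfl⟩
  have hM'le : M' ≤ M :=
    PySem.List.max?_isMax hM M' (List.mem_of_mem_erase (PySem.List.max?_mem hM'))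
  have hMle : M ≤ M' := by
    by_cases hcase : M = mn
    · -- the minimum equals the maximum: every element equals M
      have h1 := PySem.List.min?_isMin hmn
      have h2 := PySem.List.max?_isMax hM
      have : M' ∈ cs := List.mem_of_mem_erase (PySem.List.max?_mem hM')
      have := h1 M' this
      omega
    · have hMmem : M ∈ cs.erase mn :=
        (List.mem_erase_of_ne hcase).mpr (PySem.List.max?_mem hM)
      exact PySem.List.max?_isMax hM' M hMmem
  have : M' = M := le_antisymm hM'le hMle
  rw [hM', this]

-- the remove(min)-loop leaves exactly the (first) maximum
lemma remove_min_step (cs : List Int) (mn : Int)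
    (hmn : PySem.List.min? cs (fun v => v) = some mn) :
    (match PySem.List.min? cs (fun v => v) with
      | some m => (PySem.List.remove? cs m).getD cs
      | none => cs) = cs.erase mn := by
  simp only [hmn, PySem.List.remove?_eq_some_erase cs mn (PySem.List.min?_mem hmn)]
  rfl

lemma remove_min_iter (n : Nat) :
    ∀ (cs : List Int) (M : Int), cs.length = n + 1 →
    PySem.List.max? cs (fun v => v) = some M →
    (fun cs => match PySem.List.min? cs (fun v => v) with
      | some m => (PySem.List.remove? cs m).getD cs
      | none => cs)^[n] cs = [M] := by
  induction n with
  | zero =>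
    intro cs M hlen hM
    match cs, hlen with
    | [a], _ =>
      simp only [Function.iterate_zero, id]
      have : a ∈ ([a] : List Int) := List.mem_singleton.mpr rfl
      have hMa : M ∈ ([a] : List Int) := PySem.List.max?_mem hM
      rw [List.mem_singleton.mp hMa] at hM ⊢
  | succ n ih =>
    intro cs M hlen hM
    obtain ⟨mn, hmn⟩ : ∃ mn, PySem.List.min? cs (fun v => v) = some mn := by
      cases h : PySem.List.min? cs (fun v => v) with
      | none =>
        have := (PySem.List.min?_eq_none_iff _ _).mp h
        subst this; simp at hlen
      | some m => exact ⟨m, rfl⟩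
    rw [Function.iterate_succ_apply]
    have hlen2 : 2 ≤ cs.length := by omega
    have hstep := remove_min_step cs mn hmn
    simp only [hstep]
    apply ih
    · have := List.length_erase_of_mem (PySem.List.min?_mem hmn)
      omega
    · exact erase_min_max cs mn M hlen2 hmn hM

lemma remove_min_loop (counts : List Int) (M : Int)
    (hM : PySem.List.max? counts (fun v => v) = some M) :
    (PySem.List.pyRange 0 ((counts.length : Int) - 1) 1).foldl
      (fun cs _ => match PySem.List.min? cs (fun v => v) with
        | some m => (PySem.List.remove? cs m).getD cs
        | none => cs) counts = [M] := by
  have hne : counts ≠ [] := by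
    intro h; subst h
    have h0 : PySem.List.max? ([] : List Int) (fun v => v) = none :=
      (PySem.List.max?_eq_none_iff ([] : List Int) (fun v => v)).mpr rfl
    rw [h0] at hM
    cases hM
  have hlen : 1 ≤ counts.length := List.length_pos_iff.mpr hne
  rw [foldl_const_iterate]
  rw [PySem.List.length_pyRange_one]
  have : ((counts.length : Int) - 1 - 0).toNat = counts.length - 1 := by omega
  rw [this]
  exact remove_min_iter (counts.length - 1) counts M (by omega) hM

-- the accumulation loop over state [m, s, z] adds the sum of the first k entries of t1
lemma sum_take_succ_getD (l : List Int) (i : Nat) :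
    (l.take (i + 1)).sum = (l.take i).sum + l.getD i 0 := by
  by_cases h : i < l.length
  · rw [List.sum_take_succ _ _ h, List.getD_eq_getElem _ _ h]
  · rw [List.take_of_length_le (by omega), List.take_of_length_le (by omega),
      List.getD_eq_default _ _ (by omega)]
    simp

lemma sum_loop1 (t1 : List Int) (k : Nat) (m s z : Int) :
    (PySem.List.pyRange 0 (k : Int) 1).foldl
      (fun cs i => PySem.List.pySetD cs 1 (PySem.List.pyGetD cs 1 0 + PySem.List.pyGetD t1 i 0)) [m, s, z]
    = [m, s + (t1.take k).sum, z] := by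
  induction k with
  | zero =>
    rw [show ((0 : Nat) : Int) = 0 from rfl, PySem.List.pyRange_one_eq_nil (le_refl 0)]
    simp
  | succ n ih =>
    have hcast : ((n + 1 : Nat) : Int) = (n : Int) + 1 := by push_cast; ring
    rw [hcast, PySem.List.pyRange_one_succ_right (by positivity), List.foldl_append]
    rw [ih]
    simp only [List.foldl_cons, List.foldl_nil]
    simp [PySem.List.pySetD, PySem.List.pySet?, PySem.List.pyIdx?, PySem.List.pyGetD,
      PySem.List.pyGet?, sum_take_succ_getD]
    by_cases h : n < t1.length
    · simp [h]
      ring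
    · rw [List.getElem?_eq_none (by omega : t1.length ≤ n)]
      simp [h]

lemma sum_loop2 (t2 : List Int) (k : Nat) (m s z : Int) :
    (PySem.List.pyRange 0 (k : Int) 1).foldl
      (fun cs j => PySem.List.pySetD cs 2 (PySem.List.pyGetD cs 2 0 + PySem.List.pyGetD t2 j 0)) [m, s, z]
    = [m, s, z + (t2.take k).sum] := by
  induction k with
  | zero =>
    rw [show ((0 : Nat) : Int) = 0 from rfl, PySem.List.pyRange_one_eq_nil (le_refl 0)]
    simp
  | succ n ih =>
    have hcast : ((n + 1 : Nat) : Int) = (n : Int) + 1 := by push_cast; ring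
    rw [hcast, PySem.List.pyRange_one_succ_right (by positivity), List.foldl_append]
    rw [ih]
    simp only [List.foldl_cons, List.foldl_nil]
    simp [PySem.List.pySetD, PySem.List.pySet?, PySem.List.pyIdx?, PySem.List.pyGetD,
      PySem.List.pyGet?, sum_take_succ_getD]
    by_cases h : n < t2.length
    · simp [h]
      ring
    · rw [List.getElem?_eq_none (by omega : t2.length ≤ n)]
      simp [h]

-- proof-only restatements of the two tails, applied to an arbitrary loop state
def jesA_tail (st : PySem.Set (Int × Int) × List Int × List Int × List Int) : List Int :=
  let t1 := st.2.1
  let t2 := st.2.2.1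
  let counts := st.2.2.2
  let counts := (PySem.List.pyRange 0 ((counts.length : Int) - 1) 1).foldl
      (fun cs _ => match PySem.List.min? cs (fun v => v) with
        | some m => (PySem.List.remove? cs m).getD cs
        | none => cs) counts
  let counts := counts ++ [0]
  let counts := counts ++ [0]
  let counts := (PySem.List.pyRange 0 (PySem.List.pyGetD counts 0 0) 1).foldl
      (fun cs i => PySem.List.pySetD cs 1 (PySem.List.pyGetD cs 1 0 + PySem.List.pyGetD t1 i 0)) counts
  let counts := (PySem.List.pyRange 0 (PySem.List.pyGetD counts 0 0) 1).foldl
      (fun cs j => PySem.List.pySetD cs 2 (PySem.List.pyGetD cs 2 0 + PySem.List.pyGetD t2 j 0)) counts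
  if PySem.List.pyGetD counts 0 0 ≠ 0 then
    let counts := PySem.List.pySetD counts 1
      (PySem.Int.floordiv (PySem.List.pyGetD counts 1 0) (PySem.List.pyGetD counts 0 0))
    let counts := PySem.List.pySetD counts 2
      (PySem.Int.floordiv (PySem.List.pyGetD counts 2 0) (PySem.List.pyGetD counts 0 0))
    counts
  else counts

def jesB_tail (st : PySem.Set (Int × Int) × List Int × List Int × List Int) : List Int :=
  let xs := st.2.1
  let ys := st.2.2.1
  let counts := st.2.2.2
  if counts = [] then [0, 0]
  else
    let k := (PySem.List.max? counts (fun v => v)).getD 0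
    [k, PySem.Int.floordiv (PySem.List.slice xs none (some k)).sum k,
        PySem.Int.floordiv (PySem.List.slice ys none (some k)).sum k]

lemma sum_loop1' (t1 : List Int) (K : Int) (hK : 0 ≤ K) (m s z : Int) :
    (PySem.List.pyRange 0 K 1).foldl
      (fun cs i => PySem.List.pySetD cs 1 (PySem.List.pyGetD cs 1 0 + PySem.List.pyGetD t1 i 0)) [m, s, z]
    = [m, s + (t1.take K.toNat).sum, z] := by
  rw [← Int.toNat_of_nonneg hK]
  exact sum_loop1 t1 K.toNat m s z

lemma sum_loop2' (t2 : List Int) (K : Int) (hK : 0 ≤ K) (m s z : Int) :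
    (PySem.List.pyRange 0 K 1).foldl
      (fun cs j => PySem.List.pySetD cs 2 (PySem.List.pyGetD cs 2 0 + PySem.List.pyGetD t2 j 0)) [m, s, z]
    = [m, s, z + (t2.take K.toNat).sum] := by
  rw [← Int.toNat_of_nonneg hK]
  exact sum_loop2 t2 K.toNat m s z

lemma tail_eq (st : PySem.Set (Int × Int) × List Int × List Int × List Int)
    (hpos : ∀ c ∈ st.2.2.2, 1 ≤ c) : jesA_tail st = jesB_tail st := by
  obtain ⟨comb, t1, t2, counts⟩ := st
  simp only at hpos
  unfold jesA_tail jesB_tail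
  simp only
  cases counts with
  | nil =>
    rw [PySem.List.pyRange_one_eq_nil (by norm_num)]
    simp [PySem.List.pyGetD, PySem.List.pyGet?, PySem.List.pyIdx?,
      PySem.List.pyRange_one_eq_nil (le_refl (0 : Int))]
  | cons c rest =>
    obtain ⟨M, hM⟩ : ∃ M, PySem.List.max? (c :: rest) (fun v => v) = some M := by
      cases h : PySem.List.max? (c :: rest) (fun v => v) with
      | none => exact absurd ((PySem.List.max?_eq_none_iff _ _).mp h) (by simp)
      | some m => exact ⟨m, rfl⟩
    have hMpos : 1 ≤ M := hpos M (PySem.List.max?_mem hM)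
    rw [remove_min_loop (c :: rest) M hM]
    have happ : ([M] ++ [0] ++ [0] : List Int) = [M, 0, 0] := rfl
    rw [happ]
    have hget0 : PySem.List.pyGetD ([M, 0, 0] : List Int) 0 0 = M := by
      simp [PySem.List.pyGetD, PySem.List.pyGet?, PySem.List.pyIdx?]
    rw [hget0, sum_loop1' t1 M (by omega) M 0 0]
    have hget0' : PySem.List.pyGetD ([M, 0 + (t1.take M.toNat).sum, 0] : List Int) 0 0 = M := by
      simp [PySem.List.pyGetD, PySem.List.pyGet?, PySem.List.pyIdx?]
    rw [hget0', sum_loop2' t2 M (by omega) M (0 + (t1.take M.toNat).sum) 0]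
    rw [if_neg (by simp : ¬ (c :: rest : List Int) = [])]
    rw [hM]
    have hkd : (some M).getD 0 = M := rfl
    rw [hkd]
    rw [if_pos]
    · rw [PySem.List.slice_to _ (by omega), PySem.List.slice_to _ (by omega)]
      simp [PySem.List.pyGetD, PySem.List.pyGet?, PySem.List.pyIdx?,
        PySem.List.pySetD, PySem.List.pySet?]
    · have : PySem.List.pyGetD ([M, 0 + (t1.take M.toNat).sum, 0 + (t2.take M.toNat).sum] : List Int) 0 0 = M := by
        simp [PySem.List.pyGetD, PySem.List.pyGet?, PySem.List.pyIdx?]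
      rw [this]
      omega

-- ===== VERDICT (by name: the statement is the Claim_ definition above) =====
theorem jeskyni_spec : Claim_equal_jeskyni := by
  intro matrix _ _
  unfold Spec_jeskyni
  have hA : jeskyni matrix = jesA_tail (jesA_outer matrix) := rfl
  have hB : jeskyni_alt matrix = jesB_tail (jesB_outer matrix) := rfl
  rw [hA, hB, outer_eq matrix]
  apply tail_eq
  rw [← outer_eq matrix]
  exact counts_pos matrix
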